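-- pv_equiv track=rewrite | github.com/lawrenceyim/AdventOfCode2022 | Day15.py | find_spaces
-- ===== SOURCE A (Python) =====
-- def compute_distance(input):
--     return abs(input[0] - input[2]) + abs(input[1] - input[3])
--
-- def find_spaces(input, row_to_check):
--     manhattan_distance = compute_distance(input)
--     invalid_spaces = []
--     columns_to_check = (input[1] - manhattan_distance, input[1] + manhattan_distance)
--
--     for column in range(columns_to_check[0], columns_to_check[1] + 1):
--         distance = compute_distance((input[0], input[1], row_to_check, column))
--         if distance <= manhattan_distance:
--             invalid_spaces.append((row_to_check,column))
--
--     return invalid_spaces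
-- ===== SOURCE B (Python) =====
-- def find_spaces(input, row_to_check):
--     x, y, bx, by = input[0], input[1], input[2], input[3]
--     manhattan_distance = abs(x - bx) + abs(y - by)
--     remaining = manhattan_distance - abs(x - row_to_check)
--     return [(row_to_check, column) for column in range(y - remaining, y + remaining + 1)]
-- ===== Notes on version B (the rewrite author's own statement) =====
-- stated objective: faster
-- what changed: B replaces A's scan of all 2*d+1 columns with a distance test inside by computing the remaining budget rem = d - |x - row| and emitting the interval [y-rem, y+rem] directly, so only the output columns are visited.
import Mathlib
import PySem

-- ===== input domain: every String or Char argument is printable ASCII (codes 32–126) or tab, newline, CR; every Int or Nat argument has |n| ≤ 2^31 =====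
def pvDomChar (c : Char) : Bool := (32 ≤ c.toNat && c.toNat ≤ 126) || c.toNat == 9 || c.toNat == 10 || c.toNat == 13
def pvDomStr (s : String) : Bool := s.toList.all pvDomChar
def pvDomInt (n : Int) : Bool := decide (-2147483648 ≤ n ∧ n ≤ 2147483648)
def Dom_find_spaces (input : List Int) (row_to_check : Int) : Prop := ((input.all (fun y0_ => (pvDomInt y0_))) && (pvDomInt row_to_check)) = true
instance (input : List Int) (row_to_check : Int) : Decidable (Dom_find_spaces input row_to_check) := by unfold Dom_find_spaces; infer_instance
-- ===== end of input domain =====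

-- ===== PORT A =====
-- B changes: closed-form interval emission instead of scanning every column in range.
-- index i of 'input' ported as (pyGet? input i).getD 0 -- exact under Pre_find_spaces (length >= 4, indices 0..3 in range).
def compute_distance (input : List Int) : Int :=
  |(PySem.List.pyGet? input 0).getD 0 - (PySem.List.pyGet? input 2).getD 0| +
  |(PySem.List.pyGet? input 1).getD 0 - (PySem.List.pyGet? input 3).getD 0|

def find_spaces (input : List Int) (row_to_check : Int) : List (Int × Int) :=
  let manhattan_distance := compute_distance input
  let in0 := (PySem.List.pyGet? input 0).getD 0
  let in1 := (PySem.List.pyGet? input 1).getD 0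
  let columns_to_check : Int × Int := (in1 - manhattan_distance, in1 + manhattan_distance)
  (PySem.List.pyRange columns_to_check.1 (columns_to_check.2 + 1) 1).foldl
    (fun invalid_spaces column =>
      let distance := compute_distance [in0, in1, row_to_check, column]
      if distance ≤ manhattan_distance then invalid_spaces ++ [(row_to_check, column)]
      else invalid_spaces) []

-- ===== PORT B =====
def find_spaces_alt (input : List Int) (row_to_check : Int) : List (Int × Int) :=
  let x := (PySem.List.pyGet? input 0).getD 0
  let y := (PySem.List.pyGet? input 1).getD 0
  let bx := (PySem.List.pyGet? input 2).getD 0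
  let by_ := (PySem.List.pyGet? input 3).getD 0
  let manhattan_distance := |x - bx| + |y - by_|
  let remaining := manhattan_distance - |x - row_to_check|
  (PySem.List.pyRange (y - remaining) (y + remaining + 1) 1).map (fun column => (row_to_check, column))

-- ===== PRECONDITION & SPEC =====
-- Pre_: Python A raises IndexError unless the list has at least the 4 accessed entries.
def Pre_find_spaces (input : List Int) (row_to_check : Int) : Prop := 4 ≤ input.length
instance (input : List Int) (row_to_check : Int) : Decidable (Pre_find_spaces input row_to_check) := by unfold Pre_find_spaces; infer_instance
def pvWitness_find_spaces : List Int × Int := ([0, 0, 1, 1], 0)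
def Spec_find_spaces (input : List Int) (row_to_check : Int) (out : List (Int × Int)) : Prop := out = find_spaces_alt input row_to_check
instance (input : List Int) (row_to_check : Int) (out : List (Int × Int)) : Decidable (Spec_find_spaces input row_to_check out) := by unfold Spec_find_spaces; infer_instance

-- ===== CLAIM (what is proved, stated in full; the proofs are below) =====
def Claim_equal_find_spaces : Prop := ∀ (input : List Int) (row_to_check : Int), Dom_find_spaces input row_to_check → Pre_find_spaces input row_to_check → Spec_find_spaces input row_to_check (find_spaces input row_to_check)

-- ===== LEMMAS AND PROOFS =====

-- filtering a range by membership in a sub-window is the sub-window range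
theorem pv_filter_range_window (a b lo hi : Int) (h1 : a ≤ lo) (h2 : hi < b) :
    (PySem.List.pyRange a b 1).filter (fun c => decide (lo ≤ c ∧ c ≤ hi)) =
      PySem.List.pyRange lo (hi + 1) 1 := by
  by_cases hlh : lo ≤ hi + 1
  · rw [PySem.List.pyRange_one_append a lo b h1 (by omega),
        PySem.List.pyRange_one_append lo (hi + 1) b hlh (by omega),
        List.filter_append, List.filter_append]
    have e1 : (PySem.List.pyRange a lo 1).filter (fun c => decide (lo ≤ c ∧ c ≤ hi)) = [] := by
      refine List.filter_eq_nil_iff.mpr (fun c hc => ?_)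
      rw [PySem.List.mem_pyRange_one] at hc
      simp; omega
    have e3 : (PySem.List.pyRange (hi + 1) b 1).filter (fun c => decide (lo ≤ c ∧ c ≤ hi)) = [] := by
      refine List.filter_eq_nil_iff.mpr (fun c hc => ?_)
      rw [PySem.List.mem_pyRange_one] at hc
      simp; omega
    have e2 : (PySem.List.pyRange lo (hi + 1) 1).filter (fun c => decide (lo ≤ c ∧ c ≤ hi)) =
        PySem.List.pyRange lo (hi + 1) 1 := by
      refine List.filter_eq_self.mpr (fun c hc => ?_)
      rw [PySem.List.mem_pyRange_one] at hc
      simp; omega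
    rw [e1, e2, e3, List.nil_append, List.append_nil]
  · rw [PySem.List.pyRange_one_eq_nil (a := lo) (b := hi + 1) (by omega)]
    refine List.filter_eq_nil_iff.mpr (fun c hc => ?_)
    rw [PySem.List.mem_pyRange_one] at hc
    simp; omega

-- ===== VERDICT (by name: the statement is the Claim_ definition above) =====
theorem find_spaces_spec : Claim_equal_find_spaces := by
  intro input row_to_check _ _
  unfold Spec_find_spaces find_spaces find_spaces_alt compute_distance
  generalize (PySem.List.pyGet? input 0).getD 0 = x
  generalize (PySem.List.pyGet? input 1).getD 0 = y
  generalize (PySem.List.pyGet? input 2).getD 0 = bx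
  generalize (PySem.List.pyGet? input 3).getD 0 = by_
  simp only [PySem.List.pyGet?]
  norm_num [PySem.List.pyIdx?]
  simp only [show Int.toNat 2 = 2 from rfl, show Int.toNat 3 = 3 from rfl,
    List.getElem_cons_zero, List.getElem_cons_succ]
  set t := |x - row_to_check| with ht
  set D := |x - bx| + |y - by_| with hD
  have h0 : (0:Int) ≤ t := by rw [ht]; exact abs_nonneg _
  rw [PySem.List.foldl_append_ite (p := fun column => t + |y - column| ≤ D)
        (f := fun column => (row_to_check, column)), List.nil_append]
  have hfc : ∀ c ∈ PySem.List.pyRange (y - D) (y + D + 1) 1,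
      (decide (t + |y - c| ≤ D)) = (decide (y - (D - t) ≤ c ∧ c ≤ y + (D - t))) := by
    intro c _
    simp only [decide_eq_decide]
    constructor <;> intro h
    · have := abs_le.mp (show |y - c| ≤ D - t by omega); omega
    · have : |y - c| ≤ D - t := abs_le.mpr (by omega); omega
  rw [List.filter_congr hfc,
      pv_filter_range_window (y - D) (y + D + 1) (y - (D - t)) (y + (D - t)) (by omega) (by omega)]
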